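-- pv_equiv track=rewrite | github.com/kywch/meta-mmo | reinforcement_learning/environment.py | get_team_dict
-- ===== SOURCE A (Python) =====
-- def get_team_dict(num_agents, num_agents_per_team):
--     assert (
--         num_agents % num_agents_per_team == 0
--     ), "Number of agents must be divisible by number of agents per team"
--     return {
--         i: [i * num_agents_per_team + j + 1 for j in range(num_agents_per_team)]
--         for i in range(num_agents // num_agents_per_team)
--     }
-- ===== SOURCE B (Python) =====
-- def get_team_dict(num_agents, num_agents_per_team):
--     assert (
--         num_agents % num_agents_per_team == 0
--     ), "Number of agents must be divisible by number of agents per team"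
--     teams = {}
--     for agent_id in range(1, num_agents + 1):
--         teams.setdefault((agent_id - 1) // num_agents_per_team, []).append(agent_id)
--     return teams
-- ===== Notes on version B (the rewrite author's own statement) =====
-- stated objective: alternative
-- what changed: Replaces the teams-outer/members-inner nested dict comprehension by a single flat pass over the agents that buckets each agent_id into teams.setdefault((agent_id-1)//num_agents_per_team, []).
-- outside the precondition, e.g. on get_team_dict(4, -2): A returns {}, B returns {0: [1], -1: [2, 3], -2: [4]}; on get_team_dict(-4, -2): A returns {0: [], 1: []}, B returns {}
import Mathlib
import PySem

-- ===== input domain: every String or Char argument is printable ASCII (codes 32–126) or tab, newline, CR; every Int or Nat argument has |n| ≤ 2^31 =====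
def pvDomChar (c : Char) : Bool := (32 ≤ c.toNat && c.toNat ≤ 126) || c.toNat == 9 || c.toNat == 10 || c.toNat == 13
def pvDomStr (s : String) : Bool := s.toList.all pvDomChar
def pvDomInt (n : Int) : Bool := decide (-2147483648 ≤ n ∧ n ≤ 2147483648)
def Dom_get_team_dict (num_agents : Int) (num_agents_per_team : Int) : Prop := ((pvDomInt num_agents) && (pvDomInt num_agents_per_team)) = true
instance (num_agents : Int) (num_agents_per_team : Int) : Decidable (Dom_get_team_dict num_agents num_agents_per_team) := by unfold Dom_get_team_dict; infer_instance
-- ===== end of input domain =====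

-- B replaces A's teams-outer/members-inner nested dict comprehension by one flat pass
-- over the agents that buckets each agent_id via setdefault((agent_id-1)//per_team, []).append.

-- ===== PORT A =====
def get_team_dict (num_agents : Int) (num_agents_per_team : Int) : List (Int × List Int) :=
  -- {i: [i*per+j+1 for j in range(per)] for i in range(num_agents // per)}
  ((PySem.List.pyRange 0 (PySem.Int.floordiv num_agents num_agents_per_team) 1).foldl
    (fun d i => d.insert i
      ((PySem.List.pyRange 0 num_agents_per_team 1).map
        (fun j => i * num_agents_per_team + j + 1)))
    PySem.Dict.empty).items

-- ===== PORT B =====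
-- loop body: teams.setdefault((agent_id - 1) // per_team, []).append(agent_id)
def pvStepB (num_agents_per_team : Int) (d : PySem.Dict Int (List Int)) (agent_id : Int) :
    PySem.Dict Int (List Int) :=
  d.modify (PySem.Int.floordiv (agent_id - 1) num_agents_per_team) [] (· ++ [agent_id])

def get_team_dict_alt (num_agents : Int) (num_agents_per_team : Int) : List (Int × List Int) :=
  ((PySem.List.pyRange 1 (num_agents + 1) 1).foldl (pvStepB num_agents_per_team)
    PySem.Dict.empty).items

-- ===== PRECONDITION & SPEC =====
-- Pre_ restricts to the natural domain of a POSITIVE team size (and the divisibility A asserts: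
-- otherwise A raises AssertionError, and ZeroDivisionError for per_team = 0). For negative
-- num_agents_per_team A's assert can still pass and A returns a degenerate dict (empty, or teams
-- with empty member lists) — a corner outside the function's intent that B's bucketing does not match.
def Pre_get_team_dict (num_agents : Int) (num_agents_per_team : Int) : Prop :=
  0 < num_agents_per_team ∧ PySem.Int.mod num_agents num_agents_per_team = 0
instance (num_agents : Int) (num_agents_per_team : Int) : Decidable (Pre_get_team_dict num_agents num_agents_per_team) := by unfold Pre_get_team_dict; infer_instance

def pvWitness_get_team_dict : Int × Int := (4, 2)

def Spec_get_team_dict (num_agents : Int) (num_agents_per_team : Int) (out : List (Int × List Int)) : Prop := out = get_team_dict_alt num_agents num_agents_per_team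
instance (num_agents : Int) (num_agents_per_team : Int) (out : List (Int × List Int)) : Decidable (Spec_get_team_dict num_agents num_agents_per_team out) := by unfold Spec_get_team_dict; infer_instance

-- ===== CLAIM (what is proved, stated in full; the proofs are below) =====
def Claim_equal_get_team_dict : Prop := ∀ (num_agents : Int) (num_agents_per_team : Int), Dom_get_team_dict num_agents num_agents_per_team → Pre_get_team_dict num_agents num_agents_per_team → Spec_get_team_dict num_agents num_agents_per_team (get_team_dict num_agents num_agents_per_team)

-- ===== LEMMAS AND PROOFS =====

-- team of agent i*p + t + 1 (0 ≤ t < p) is i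
theorem pv_team (p i t : Int) (hp : 0 < p) (h0 : 0 ≤ t) (h1 : t < p) :
    PySem.Int.floordiv (i * p + t) p = i := by
  rw [PySem.Int.floordiv_eq_iff_of_pos hp]
  constructor <;> nlinarith

theorem pv_not_mem_keys (d : PySem.Dict Int (List Int)) (i : Int)
    (h : d.contains i = false) : ∀ q ∈ d.items, q.1 ≠ i := by
  intro q hq hqi
  have hm : i ∈ d.keys := by
    simp only [PySem.Dict.keys]
    exact hqi ▸ List.mem_map_of_mem hq
  rw [(PySem.Dict.contains_iff_mem_keys d i).mpr hm] at h
  exact Bool.true_eq_false.mp h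

theorem pv_get?_last (pre : List (Int × List Int)) (i : Int) (xs : List Int)
    (h : ∀ q ∈ pre, q.1 ≠ i) :
    (PySem.Dict.mk (pre ++ [(i, xs)])).get? i = some xs := by
  induction pre with
  | nil => simp [PySem.Dict.get?_mk_cons]
  | cons q rest ih =>
    obtain ⟨k, v⟩ := q
    have hk : k ≠ i := h (k, v) (by simp)
    rw [List.cons_append, PySem.Dict.get?_mk_cons]
    rw [if_neg (by simpa using hk)]
    exact ih (fun q hq => h q (by simp [hq]))

theorem pv_modify_fresh (d : PySem.Dict Int (List Int)) (i a : Int)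
    (h : d.contains i = false) :
    (d.modify i [] (· ++ [a])).items = d.items ++ [(i, [a])] := by
  show (d.insert i (d.getD i [] ++ [a])).items = _
  rw [PySem.Dict.getD_of_not_contains d [] h, PySem.Dict.items_insert_of_not_contains d _ h]
  rfl

theorem pv_modify_last (pre : List (Int × List Int)) (i : Int) (xs : List Int) (a : Int)
    (h : ∀ q ∈ pre, q.1 ≠ i) :
    ((PySem.Dict.mk (pre ++ [(i, xs)])).modify i [] (· ++ [a])).items
      = pre ++ [(i, xs ++ [a])] := by
  have hget : (PySem.Dict.mk (pre ++ [(i, xs)])).get? i = some xs := pv_get?_last pre i xs h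
  have hcont : (PySem.Dict.mk (pre ++ [(i, xs)])).contains i = true := by
    rw [PySem.Dict.contains_eq_isSome_get?, hget]; rfl
  show ((PySem.Dict.mk (pre ++ [(i, xs)])).insert i
      ((PySem.Dict.mk (pre ++ [(i, xs)])).getD i [] ++ [a])).items = _
  rw [PySem.Dict.getD_eq_get?_getD, hget, PySem.Dict.items_insert_of_contains _ _ hcont]
  show (pre ++ [(i, xs)]).map _ = _
  rw [List.map_append]
  congr 1
  · conv_rhs => rw [← List.map_id pre]
    apply List.map_congr_left
    intro q hq
    simp [h q hq]
  · simp

theorem pv_block (p i : Int) (hp : 0 < p) (d : PySem.Dict Int (List Int))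
    (hfresh : d.contains i = false) :
    ∀ t : Nat, 0 < t → (t : Int) ≤ p →
    ((PySem.List.pyRange (i * p + 1) (i * p + 1 + t) 1).foldl (pvStepB p) d).items
      = d.items ++ [(i, PySem.List.pyRange (i * p + 1) (i * p + 1 + t) 1)] := by
  intro t
  induction t with
  | zero => intro h; omega
  | succ t ih =>
    intro _ hle
    by_cases ht : t = 0
    · subst ht
      rw [show (i * p + 1 + ((0 : Nat) + 1 : Nat) : Int) = (i * p + 1) + 1 by push_cast; ring,
        PySem.List.pyRange_one_singleton]
      show (pvStepB p d (i * p + 1)).items = _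
      unfold pvStepB
      rw [show i * p + 1 - 1 = i * p + 0 by ring, pv_team p i 0 hp le_rfl hp]
      exact pv_modify_fresh d i _ hfresh
    · have h0t : 0 < t := Nat.pos_of_ne_zero ht
      have hsplit : PySem.List.pyRange (i * p + 1) (i * p + 1 + ((t : Nat) + 1 : Nat)) 1
          = PySem.List.pyRange (i * p + 1) (i * p + 1 + t) 1 ++ [i * p + 1 + t] := by
        rw [show (i * p + 1 + ((t : Nat) + 1 : Nat) : Int) = (i * p + 1 + t) + 1 by push_cast; ring]
        exact PySem.List.pyRange_one_succ_right (by linarith [Int.natCast_nonneg t])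
      rw [hsplit, List.foldl_append]
      have hIH := ih h0t (by omega)
      set D := (PySem.List.pyRange (i * p + 1) (i * p + 1 + t) 1).foldl (pvStepB p) d with hD
      have hDeq : D = PySem.Dict.mk (d.items ++ [(i, PySem.List.pyRange (i * p + 1) (i * p + 1 + t) 1)]) :=
        PySem.Dict.ext hIH
      show (pvStepB p D (i * p + 1 + t)).items = _
      unfold pvStepB
      rw [show i * p + 1 + (t : Int) - 1 = i * p + t by ring,
        pv_team p i t hp (by positivity) (by push_cast at hle; omega), hDeq,
        pv_modify_last _ _ _ _ (pv_not_mem_keys d i hfresh)]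

theorem pv_B (p : Int) (hp : 0 < p) :
    ∀ k : Nat,
    ((PySem.List.pyRange 1 ((k : Int) * p + 1) 1).foldl (pvStepB p) PySem.Dict.empty).items
      = (PySem.List.pyRange 0 (k : Int) 1).map
          (fun i => (i, PySem.List.pyRange (i * p + 1) (i * p + 1 + p) 1)) := by
  intro k
  induction k with
  | zero =>
    rw [show ((0 : Nat) : Int) * p + 1 = 1 by ring, PySem.List.pyRange_one_eq_nil le_rfl]
    simp [PySem.List.pyRange_one_eq_nil]
    rfl
  | succ k ih =>
    have hk0 : (0 : Int) ≤ (k : Int) * p := by positivity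
    have hsplit : PySem.List.pyRange 1 (((k : Nat) + 1 : Nat) * p + 1) 1
        = PySem.List.pyRange 1 ((k : Int) * p + 1) 1
          ++ PySem.List.pyRange ((k : Int) * p + 1) ((k : Int) * p + 1 + p) 1 := by
      rw [show ((((k : Nat) + 1 : Nat) : Int) * p + 1) = (k : Int) * p + 1 + p by push_cast; ring]
      exact PySem.List.pyRange_one_append 1 ((k : Int) * p + 1) _ (by omega) (by omega)
    rw [hsplit, List.foldl_append]
    set D := (PySem.List.pyRange 1 ((k : Int) * p + 1) 1).foldl (pvStepB p) PySem.Dict.empty with hD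
    have hfresh : D.contains (k : Int) = false := by
      rw [PySem.Dict.contains_eq_decide_mem_keys]
      have : (k : Int) ∉ D.keys := by
        simp only [PySem.Dict.keys, ih, List.map_map]
        intro hmem
        obtain ⟨x, hx, hxe⟩ := List.mem_map.mp hmem
        have := PySem.List.mem_pyRange_one.mp hx
        simp only [Function.comp] at hxe
        omega
      simp [this]
    have hblk := pv_block p (k : Int) hp D hfresh p.toNat (by omega) (by omega)
    rw [show ((p.toNat : Nat) : Int) = p by omega] at hblk
    rw [hblk, ih]
    rw [show (((k : Nat) + 1 : Nat) : Int) = (k : Int) + 1 by push_cast; ring,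
      PySem.List.pyRange_one_succ_right (by omega), List.map_append]
    simp

theorem pv_A (n p : Int) :
    get_team_dict n p
      = (PySem.List.pyRange 0 (PySem.Int.floordiv n p) 1).map
          (fun i => (i, (PySem.List.pyRange 0 p 1).map (fun j => i * p + j + 1))) := by
  unfold get_team_dict
  have := PySem.Dict.items_foldl_insert_fresh
    (PySem.List.pyRange 0 (PySem.Int.floordiv n p) 1) (fun i => i)
    (fun i => (PySem.List.pyRange 0 p 1).map (fun j => i * p + j + 1)) PySem.Dict.empty
    (fun a _ => by simp [pysem])
    (by simpa using PySem.List.nodup_pyRange_one 0 (PySem.Int.floordiv n p))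
  simpa using this

theorem pv_members (p i : Int) (hp : 0 < p) :
    (PySem.List.pyRange 0 p 1).map (fun j => i * p + j + 1)
      = PySem.List.pyRange (i * p + 1) (i * p + 1 + p) 1 := by
  rw [PySem.List.pyRange_one 0 p, PySem.List.pyRange_one (i * p + 1) (i * p + 1 + p),
    List.map_map, show (p - 0).toNat = (i * p + 1 + p - (i * p + 1)).toNat by omega]
  apply List.map_congr_left
  intro a _
  simp only [Function.comp]
  ring

-- ===== VERDICT (by name: the statement is the Claim_ definition above) =====
theorem get_team_dict_spec : Claim_equal_get_team_dict := by
  intro n p _ hpre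
  obtain ⟨hp, hmod⟩ := hpre
  unfold Spec_get_team_dict
  have hquot : PySem.Int.floordiv n p * p = n := by
    have := PySem.Int.floordiv_mul_add_mod n p
    omega
  rw [pv_A]
  by_cases hn : n ≤ 0
  · have hq : PySem.Int.floordiv n p ≤ 0 := by nlinarith
    rw [PySem.List.pyRange_one_eq_nil hq]
    unfold get_team_dict_alt
    rw [PySem.List.pyRange_one_eq_nil (show n + 1 ≤ 1 by omega)]
    rfl
  · have hn' : 0 < n := by omega
    have hq : 0 < PySem.Int.floordiv n p := by nlinarith
    set q := PySem.Int.floordiv n p with hqdef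
    have hcast : ((q.toNat : Nat) : Int) = q := by omega
    unfold get_team_dict_alt
    rw [show n + 1 = (q.toNat : Int) * p + 1 by rw [hcast]; omega]
    rw [pv_B p hp q.toNat, hcast]
    apply List.map_congr_left
    intro i _
    rw [pv_members p i hp]
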